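-- pv_equiv track=rewrite | github.com/facebookresearch/code-prediction-transformer | models/trav_trans/generate_ast_ids.py | get_type_ids
-- ===== SOURCE A (Python) =====
-- def get_type_ids(ast):
--     ids = {
--         "call_ids": [],
--         "assign_ids": [],
--         "return_ids": [],
--         "list_ids": [],
--         "dict_ids": [],
--         "raise_ids": [],
--     }
--     for i, node in enumerate(ast):
--         if "type" in node:
--             type_ = node["type"]
--             if type_ == "Call":
--                 ids["call_ids"].append(i)
--             elif type_ == "Assign":
--                 ids["assign_ids"].append(i)
--             elif type_ == "Return":
--                 ids["return_ids"].append(i)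
--             elif type_ in {"ListComp", "ListLoad", "ListStore"}:
--                 ids["list_ids"].append(i)
--             elif type_ in {"DictComp", "DictLoad", "DictStore"}:
--                 ids["dict_ids"].append(i)
--             elif type_ == "Raise":
--                 ids["raise_ids"].append(i)
--     return ids
-- ===== SOURCE B (Python) =====
-- def get_type_ids(ast):
--     def pick(pred):
--         return [i for i, node in enumerate(ast) if "type" in node and pred(node["type"])]
--     return {
--         "call_ids": pick(lambda t: t == "Call"),
--         "assign_ids": pick(lambda t: t == "Assign"),
--         "return_ids": pick(lambda t: t == "Return"),
--         "list_ids": pick(lambda t: t in ("ListComp", "ListLoad", "ListStore")),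
--         "dict_ids": pick(lambda t: t in ("DictComp", "DictLoad", "DictStore")),
--         "raise_ids": pick(lambda t: t == "Raise"),
--     }
-- ===== Notes on version B (the rewrite author's own statement) =====
-- stated objective: alternative
-- what changed: Replaces the single stateful loop that dispatches into a pre-built dict via an if/elif chain with six independent filtered scans, one comprehension per category, assembling the result dict directly.
import Mathlib
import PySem

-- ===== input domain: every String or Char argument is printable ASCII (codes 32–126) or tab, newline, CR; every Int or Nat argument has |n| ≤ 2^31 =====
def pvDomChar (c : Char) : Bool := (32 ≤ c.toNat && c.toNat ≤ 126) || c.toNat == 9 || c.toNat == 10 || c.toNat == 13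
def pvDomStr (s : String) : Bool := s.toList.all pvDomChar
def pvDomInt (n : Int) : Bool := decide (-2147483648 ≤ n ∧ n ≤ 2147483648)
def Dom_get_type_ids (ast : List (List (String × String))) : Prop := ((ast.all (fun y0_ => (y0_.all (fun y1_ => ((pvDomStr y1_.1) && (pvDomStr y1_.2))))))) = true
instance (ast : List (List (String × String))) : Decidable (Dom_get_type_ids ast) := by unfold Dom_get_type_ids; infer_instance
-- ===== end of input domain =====

-- B replaces A's single stateful dispatch loop by six independent filtered scans (one per category); alternative decomposition, same result.


-- ===== PORT A =====
def gtiInit : PySem.Dict String (List Int) :=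
  PySem.Dict.ofList
    [("call_ids", []), ("assign_ids", []), ("return_ids", []),
     ("list_ids", []), ("dict_ids", []), ("raise_ids", [])]

def gtiStep (d : PySem.Dict String (List Int)) (p : Int × List (String × String)) :
    PySem.Dict String (List Int) :=
  let node := PySem.Dict.mk p.2
  match node.get? "type" with
  | none => d
  | some t =>
    if t = "Call" then d.modify "call_ids" [] (· ++ [p.1])
    else if t = "Assign" then d.modify "assign_ids" [] (· ++ [p.1])
    else if t = "Return" then d.modify "return_ids" [] (· ++ [p.1])
    else if t = "ListComp" ∨ t = "ListLoad" ∨ t = "ListStore" then d.modify "list_ids" [] (· ++ [p.1])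
    else if t = "DictComp" ∨ t = "DictLoad" ∨ t = "DictStore" then d.modify "dict_ids" [] (· ++ [p.1])
    else if t = "Raise" then d.modify "raise_ids" [] (· ++ [p.1])
    else d

def get_type_ids (ast : List (List (String × String))) : List (String × List Int) :=
  ((PySem.List.enumerate ast).foldl gtiStep gtiInit).items

-- ===== PORT B =====
-- one filtered scan over enumerate(ast), keeping indices whose node's "type" satisfies pred
def gtiPickL (l : List (Int × List (String × String))) (pred : String → Bool) : List Int :=
  l.filterMap (fun p =>
    match (PySem.Dict.mk p.2).get? "type" with
    | some t => if pred t then some p.1 else none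
    | none => none)

def get_type_ids_alt (ast : List (List (String × String))) : List (String × List Int) :=
  let e := PySem.List.enumerate ast
  [("call_ids", gtiPickL e (· == "Call")),
   ("assign_ids", gtiPickL e (· == "Assign")),
   ("return_ids", gtiPickL e (· == "Return")),
   ("list_ids", gtiPickL e (fun t => t == "ListComp" || t == "ListLoad" || t == "ListStore")),
   ("dict_ids", gtiPickL e (fun t => t == "DictComp" || t == "DictLoad" || t == "DictStore")),
   ("raise_ids", gtiPickL e (· == "Raise"))]

-- ===== PRECONDITION & SPEC =====
def Spec_get_type_ids (ast : List (List (String × String))) (out : List (String × List Int)) : Prop := out = get_type_ids_alt ast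
instance (ast : List (List (String × String))) (out : List (String × List Int)) : Decidable (Spec_get_type_ids ast out) := by unfold Spec_get_type_ids; infer_instance

-- ===== CLAIM (what is proved, stated in full; the proofs are below) =====
def Claim_equal_get_type_ids : Prop := ∀ (ast : List (List (String × String))), Dom_get_type_ids ast → Spec_get_type_ids ast (get_type_ids ast)

-- ===== LEMMAS AND PROOFS =====

-- loop invariant: folding gtiStep over any pair list, starting from the six-key dict,
-- appends exactly the six filtered selections to the accumulated lists
theorem gti_fold (l : List (Int × List (String × String))) :
    ∀ c a r li di ra,
      (l.foldl gtiStep (PySem.Dict.mk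
        [("call_ids", c), ("assign_ids", a), ("return_ids", r),
         ("list_ids", li), ("dict_ids", di), ("raise_ids", ra)])).items
      = [("call_ids", c ++ gtiPickL l (· == "Call")),
         ("assign_ids", a ++ gtiPickL l (· == "Assign")),
         ("return_ids", r ++ gtiPickL l (· == "Return")),
         ("list_ids", li ++ gtiPickL l (fun t => t == "ListComp" || t == "ListLoad" || t == "ListStore")),
         ("dict_ids", di ++ gtiPickL l (fun t => t == "DictComp" || t == "DictLoad" || t == "DictStore")),
         ("raise_ids", ra ++ gtiPickL l (· == "Raise"))] := by
  induction l with
  | nil => intro c a r li di ra; simp [gtiPickL, PySem.Dict.items, PySem.Dict.mk]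
  | cons p rest ih =>
    intro c a r li di ra
    simp only [List.foldl_cons, gtiStep]
    cases h : (PySem.Dict.mk p.2).get? "type" with
    | none => simp [gtiPickL, List.filterMap_cons, or_assoc, h, ih c a r li di ra]
    | some t =>
      simp only []
      split_ifs with h1 h2 h3 h4 h5 h6
      · simp only [PySem.Dict.modify, PySem.Dict.contains, PySem.Dict.getD, PySem.Dict.get?,
          PySem.Dict.insert, PySem.Dict.mk]
        simp [gtiPickL, List.filterMap_cons, or_assoc, h, h1, ih (c ++ [p.1]) a r li di ra]
      · simp only [PySem.Dict.modify, PySem.Dict.contains, PySem.Dict.getD, PySem.Dict.get?,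
          PySem.Dict.insert, PySem.Dict.mk]
        simp [gtiPickL, List.filterMap_cons, or_assoc, h, h1, h2, ih c (a ++ [p.1]) r li di ra]
      · simp only [PySem.Dict.modify, PySem.Dict.contains, PySem.Dict.getD, PySem.Dict.get?,
          PySem.Dict.insert, PySem.Dict.mk]
        simp [gtiPickL, List.filterMap_cons, or_assoc, h, h1, h2, h3, ih c a (r ++ [p.1]) li di ra]
      · simp only [PySem.Dict.modify, PySem.Dict.contains, PySem.Dict.getD, PySem.Dict.get?,
          PySem.Dict.insert, PySem.Dict.mk]
        have hne : ¬ (t = "DictComp" ∨ t = "DictLoad" ∨ t = "DictStore") := by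
          rcases h4 with h4 | h4 | h4 <;> subst h4 <;> decide
        have hr4 : t ≠ "Raise" := by rcases h4 with h4 | h4 | h4 <;> subst h4 <;> decide
        simp [gtiPickL, List.filterMap_cons, or_assoc, h, h1, h2, h3, h4, hne, hr4, ih c a r (li ++ [p.1]) di ra]
      · simp only [PySem.Dict.modify, PySem.Dict.contains, PySem.Dict.getD, PySem.Dict.get?,
          PySem.Dict.insert, PySem.Dict.mk]
        have hr : t ≠ "Raise" := by
          rcases h5 with h5 | h5 | h5 <;> subst h5 <;> decide
        simp [gtiPickL, List.filterMap_cons, or_assoc, h, h1, h2, h3, h4, h5, hr, ih c a r li (di ++ [p.1]) ra]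
      · simp only [PySem.Dict.modify, PySem.Dict.contains, PySem.Dict.getD, PySem.Dict.get?,
          PySem.Dict.insert, PySem.Dict.mk]
        simp [gtiPickL, List.filterMap_cons, or_assoc, h, h1, h2, h3, h4, h5, h6, ih c a r li di (ra ++ [p.1])]
      · simp [gtiPickL, List.filterMap_cons, or_assoc, h, h1, h2, h3, h4, h5, h6, ih c a r li di ra]

theorem gtiInit_eq : gtiInit = PySem.Dict.mk
    [("call_ids", []), ("assign_ids", []), ("return_ids", []),
     ("list_ids", []), ("dict_ids", []), ("raise_ids", [])] := by decide

-- ===== VERDICT (by name: the statement is the Claim_ definition above) =====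
theorem get_type_ids_spec : Claim_equal_get_type_ids := by
  intro ast _
  unfold Spec_get_type_ids get_type_ids get_type_ids_alt
  rw [gtiInit_eq, gti_fold]
  simp
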